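-- pv_equiv track=rewrite | github.com/RmndB/Z3-Symbolic-Analyser | main.py | sequenceSymbolRetriever
-- ===== SOURCE A (Python) =====
-- def sequenceSymbolRetriever(inAirConsts, inAirVariables, loadOrder, inAirBinaryOps):
--     opSymbol = inAirBinaryOps.pop()
--     loadType = loadOrder.pop()
--
--     if loadType == "LOAD_FAST":
--         toReturn = opSymbol + " symbolRetriever[\"" + inAirVariables.pop() + "\"]"
--     elif loadType == "LOAD_CONST":
--         toReturn = opSymbol + " " + str(inAirConsts.pop())
--     else:
--         raise RuntimeError('Failed to read values')
--
--     loadType = loadOrder.pop()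
--     if loadType == "LOAD_FAST":
--         toReturn = "symbolRetriever[\"" + inAirVariables.pop() + "\"] " + toReturn
--     elif loadType == "LOAD_CONST":
--         toReturn = str(inAirConsts.pop()) + " " + toReturn
--     elif loadType == "BINARY_OP":
--         return sequenceSymbolRetriever(inAirConsts, inAirVariables, loadOrder, inAirBinaryOps) + " " + toReturn
--     else:
--         raise RuntimeError('Failed to read values')
--
--     return toReturn
-- ===== SOURCE B (Python) =====
-- def sequenceSymbolRetriever(inAirConsts, inAirVariables, loadOrder, inAirBinaryOps):
--     def operand():
--         loadType = loadOrder.pop()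
--         if loadType == "LOAD_FAST":
--             return 'symbolRetriever["' + inAirVariables.pop() + '"]'
--         if loadType == "LOAD_CONST":
--             return str(inAirConsts.pop())
--         raise RuntimeError('Failed to read values')
--
--     parts = []
--     while True:
--         opSymbol = inAirBinaryOps.pop()
--         parts.append(opSymbol + " " + operand())
--         if loadOrder[-1] == "BINARY_OP":
--             loadOrder.pop()
--             continue
--         parts.append(operand())
--         break
--     parts.reverse()
--     return " ".join(parts)
-- ===== Notes on version B (the rewrite author's own statement) =====
-- stated objective: alternative
-- what changed: Replaces A's recursion (which concatenates each level's fragment after the recursive call returns) with a flat while-loop that collects per-level fragments in a list via an operand() helper, then reverses the list and joins it with ' '; same pop order, same result string.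
import Mathlib
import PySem

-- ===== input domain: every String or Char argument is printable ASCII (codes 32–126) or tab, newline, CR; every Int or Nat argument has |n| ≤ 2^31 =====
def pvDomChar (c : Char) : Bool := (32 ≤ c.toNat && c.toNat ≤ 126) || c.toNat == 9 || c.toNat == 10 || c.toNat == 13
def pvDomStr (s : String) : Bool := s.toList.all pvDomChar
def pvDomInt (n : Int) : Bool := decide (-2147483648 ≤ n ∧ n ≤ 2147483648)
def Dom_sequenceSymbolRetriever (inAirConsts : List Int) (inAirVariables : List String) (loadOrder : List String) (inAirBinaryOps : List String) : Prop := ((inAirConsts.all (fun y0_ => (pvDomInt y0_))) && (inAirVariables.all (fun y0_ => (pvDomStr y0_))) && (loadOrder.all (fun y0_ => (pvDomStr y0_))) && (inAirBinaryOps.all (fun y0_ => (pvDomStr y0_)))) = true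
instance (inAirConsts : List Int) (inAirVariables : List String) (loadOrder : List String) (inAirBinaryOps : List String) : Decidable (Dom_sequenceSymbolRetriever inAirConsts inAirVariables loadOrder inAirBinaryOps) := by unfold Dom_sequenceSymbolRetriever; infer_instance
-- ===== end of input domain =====

-- B replaces A's recursion (which concatenates after the recursive call returns) by a flat loop
-- that collects each level's fragment in a list, reverses it, and joins with " "; same pop order.
-- Both versions pop from the argument lists in place in Python — the equivalence proved here is
-- about the RETURN value (the mutations performed by A and B are identical on Pre_).

-- ===== PORT A =====
-- A, step for step: pop an op and a load type, build toReturn; pop a second load type and either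
-- prepend an operand, recurse (BINARY_OP) appending " " + toReturn, or raise (→ none).
def sequenceSymbolRetrieverCore (inAirConsts : List Int) (inAirVariables : List String) (loadOrder : List String) (inAirBinaryOps : List String) : Option String :=
  match PySem.List.pop? inAirBinaryOps with
  | none => none
  | some (opSymbol, ops') =>
    match h1 : PySem.List.pop? loadOrder with
    | none => none
    | some (loadType, l1) =>
      match (if loadType = "LOAD_FAST" then
               (PySem.List.pop? inAirVariables).map
                 (fun p => (opSymbol ++ " symbolRetriever[\"" ++ p.1 ++ "\"]", inAirConsts, p.2))
             else if loadType = "LOAD_CONST" then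
               (PySem.List.pop? inAirConsts).map
                 (fun p => (opSymbol ++ " " ++ PySem.Int.toStr p.1, p.2, inAirVariables))
             else none) with
      | none => none
      | some (toReturn, c1, v1) =>
        match h2 : PySem.List.pop? l1 with
        | none => none
        | some (loadType2, l2) =>
          if loadType2 = "LOAD_FAST" then
            (PySem.List.pop? v1).map (fun p => "symbolRetriever[\"" ++ p.1 ++ "\"] " ++ toReturn)
          else if loadType2 = "LOAD_CONST" then
            (PySem.List.pop? c1).map (fun p => PySem.Int.toStr p.1 ++ " " ++ toReturn)
          else if loadType2 = "BINARY_OP" then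
            (sequenceSymbolRetrieverCore c1 v1 l2 ops').map (fun r => r ++ " " ++ toReturn)
          else none
termination_by loadOrder.length
decreasing_by
  have e1 := PySem.List.length_of_pop?_eq_some _ h1
  have e2 := PySem.List.length_of_pop?_eq_some _ h2
  simp at e1 e2; omega

def sequenceSymbolRetriever (inAirConsts : List Int) (inAirVariables : List String) (loadOrder : List String) (inAirBinaryOps : List String) : String :=
  (sequenceSymbolRetrieverCore inAirConsts inAirVariables loadOrder inAirBinaryOps).getD ""

-- ===== PORT B =====
-- B's helper operand(): pop a load type and return the operand's text (no surrounding spaces);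
-- raise (→ none) on anything but LOAD_FAST/LOAD_CONST.
def ssrOperand (c : List Int) (v : List String) (l : List String) : Option (String × List Int × List String × List String) :=
  match PySem.List.pop? l with
  | none => none
  | some (loadType, l') =>
    if loadType = "LOAD_FAST" then
      (PySem.List.pop? v).map (fun p => ("symbolRetriever[\"" ++ p.1 ++ "\"]", c, p.2, l'))
    else if loadType = "LOAD_CONST" then
      (PySem.List.pop? c).map (fun p => (PySem.Int.toStr p.1, p.2, v, l'))
    else none

-- (termination helper for the loop below, cited by name in decreasing_by)
theorem ssrOperand_length {c : List Int} {v : List String} {l : List String} {r : String × List Int × List String × List String}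
    (h : ssrOperand c v l = some r) : r.2.2.2.length + 1 = l.length := by
  unfold ssrOperand at h
  cases hp : PySem.List.pop? l with
  | none => rw [hp] at h; exact absurd h (by simp)
  | some p =>
    obtain ⟨lt, l'⟩ := p
    rw [hp] at h
    have hl := PySem.List.length_of_pop?_eq_some _ hp
    simp only at h hl
    split_ifs at h
    · cases hv : PySem.List.pop? v with
      | none => rw [hv] at h; exact absurd h (by simp)
      | some q => rw [hv] at h; simp at h; subst h; simpa using hl
    · cases hc : PySem.List.pop? c with
      | none => rw [hc] at h; exact absurd h (by simp)
      | some q => rw [hc] at h; simp at h; subst h; simpa using hl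

-- B's while-loop: pop an op, append "op operand()" to parts; peek loadOrder[-1] — on BINARY_OP
-- pop it and continue, otherwise append the closing operand and stop, returning the parts list.
def ssrParts (c : List Int) (v : List String) (l : List String) (o : List String) (parts : List String) : Option (List String) :=
  match PySem.List.pop? o with
  | none => none
  | some (opSymbol, o') =>
    match h1 : ssrOperand c v l with
    | none => none
    | some (rhs, c1, v1, l1) =>
      let parts1 := parts ++ [opSymbol ++ " " ++ rhs]
      match PySem.List.pyGet? l1 (-1) with
      | none => none
      | some peek =>
        if peek = "BINARY_OP" then
          match h2 : PySem.List.pop? l1 with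
          | none => none
          | some (_, l2) => ssrParts c1 v1 l2 o' parts1
        else
          (ssrOperand c1 v1 l1).map (fun q => parts1 ++ [q.1])
termination_by l.length
decreasing_by
  have e1 := ssrOperand_length h1
  have e2 := PySem.List.length_of_pop?_eq_some _ h2
  simp at e1 e2; omega

-- reverse the collected parts and join with " "
def sequenceSymbolRetriever_alt (inAirConsts : List Int) (inAirVariables : List String) (loadOrder : List String) (inAirBinaryOps : List String) : String :=
  ((ssrParts inAirConsts inAirVariables loadOrder inAirBinaryOps []).map
    (fun parts => PySem.Str.join " " parts.reverse)).getD ""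

-- ===== PRECONDITION & SPEC =====
-- Pre_ excludes exactly the inputs on which the Python A raises (IndexError from popping an
-- exhausted list, or RuntimeError on a load type that is not LOAD_FAST/LOAD_CONST/BINARY_OP):
-- read back to front, loadOrder must end in m operand/BINARY_OP levels closed by an operand,
-- with enough ops, variables and constants to pop.
def Pre_sequenceSymbolRetriever (inAirConsts : List Int) (inAirVariables : List String) (loadOrder : List String) (inAirBinaryOps : List String) : Prop :=
  ∃ m ∈ Finset.range (inAirBinaryOps.length + 1), 1 ≤ m ∧ 2 * m ≤ loadOrder.length ∧
    (∀ k < m, loadOrder.reverse.getD (2 * k) "" = "LOAD_FAST" ∨ loadOrder.reverse.getD (2 * k) "" = "LOAD_CONST") ∧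
    (∀ k < m - 1, loadOrder.reverse.getD (2 * k + 1) "" = "BINARY_OP") ∧
    (loadOrder.reverse.getD (2 * m - 1) "" = "LOAD_FAST" ∨ loadOrder.reverse.getD (2 * m - 1) "" = "LOAD_CONST") ∧
    (loadOrder.reverse.take (2 * m)).count "LOAD_FAST" ≤ inAirVariables.length ∧
    (loadOrder.reverse.take (2 * m)).count "LOAD_CONST" ≤ inAirConsts.length
instance (inAirConsts : List Int) (inAirVariables : List String) (loadOrder : List String) (inAirBinaryOps : List String) : Decidable (Pre_sequenceSymbolRetriever inAirConsts inAirVariables loadOrder inAirBinaryOps) := by unfold Pre_sequenceSymbolRetriever; infer_instance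

def pvWitness_sequenceSymbolRetriever : List Int × List String × List String × List String :=
  ([], ["x", "y"], ["LOAD_FAST", "LOAD_FAST"], ["+"])

def Spec_sequenceSymbolRetriever (inAirConsts : List Int) (inAirVariables : List String) (loadOrder : List String) (inAirBinaryOps : List String) (out : String) : Prop := out = sequenceSymbolRetriever_alt inAirConsts inAirVariables loadOrder inAirBinaryOps
instance (inAirConsts : List Int) (inAirVariables : List String) (loadOrder : List String) (inAirBinaryOps : List String) (out : String) : Decidable (Spec_sequenceSymbolRetriever inAirConsts inAirVariables loadOrder inAirBinaryOps out) := by unfold Spec_sequenceSymbolRetriever; infer_instance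

-- ===== CLAIM (what is proved, stated in full; the proofs are below) =====
def Claim_equal_sequenceSymbolRetriever : Prop := ∀ (inAirConsts : List Int) (inAirVariables : List String) (loadOrder : List String) (inAirBinaryOps : List String), Dom_sequenceSymbolRetriever inAirConsts inAirVariables loadOrder inAirBinaryOps → Pre_sequenceSymbolRetriever inAirConsts inAirVariables loadOrder inAirBinaryOps → Spec_sequenceSymbolRetriever inAirConsts inAirVariables loadOrder inAirBinaryOps (sequenceSymbolRetriever inAirConsts inAirVariables loadOrder inAirBinaryOps)

-- ===== LEMMAS AND PROOFS =====

-- " ".join of a one-element list is its element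
theorem join_single (r : String) : PySem.Str.join " " [r] = r :=
  String.toList_inj.mp (by simp [PySem.Str.toList_join, PySem.Chars.join_singleton])

-- joining after prepending a merged head: " ".join splits (a ++ " " ++ b) into two list entries
theorem join_merge (a b : String) (l : List String) :
    PySem.Str.join " " ((a ++ " " ++ b) :: l) = a ++ " " ++ PySem.Str.join " " (b :: l) := by
  apply String.toList_inj.mp
  cases l with
  | nil => simp [PySem.Str.toList_join, PySem.Chars.join_singleton]
  | cons c l => simp [PySem.Str.toList_join, PySem.Chars.join_cons_cons]

-- The loop invariant: B's loop, run with the pending parts list, agrees with A's recursion once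
-- each side's result is turned into the final joined string.
-- " ".join after a cons-cons (Python's join of at least two pieces)
theorem join_two (a b : String) (l : List String) :
    PySem.Str.join " " (a :: b :: l) = a ++ " " ++ PySem.Str.join " " (b :: l) :=
  String.toList_inj.mp (by simp [PySem.Str.toList_join, PySem.Chars.join_cons_cons])

-- B's "append the fragment, join later" step equals A's "concatenate now" step
theorem J_step (parts : List String) (part r : String) :
    PySem.Str.join " " ((parts ++ [part] ++ [r]).reverse) =
      PySem.Str.join " " ((parts ++ [r ++ " " ++ part]).reverse) := by
  simp only [List.reverse_append, List.reverse_cons, List.reverse_nil, List.nil_append,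
    List.cons_append, List.singleton_append]
  rw [join_two, join_merge]

-- A's two fragment shapes, re-associated into "operand ++ \" \" ++ rest" form
theorem split_fast (s t : String) :
    s ++ " symbolRetriever[\"" ++ t ++ "\"]" = s ++ " " ++ ("symbolRetriever[\"" ++ t ++ "\"]") :=
  String.toList_inj.mp (by simp)

theorem split_lhs_fast (t s : String) :
    "symbolRetriever[\"" ++ t ++ "\"] " ++ s = ("symbolRetriever[\"" ++ t ++ "\"]") ++ " " ++ s :=
  String.toList_inj.mp (by simp)

-- The loop invariant: B's loop, run with the pending parts list, agrees with A's recursion once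
-- each side's result is turned into the final joined string.
theorem parts_eq_core (n : Nat) : ∀ (l : List String), l.length ≤ n →
    ∀ (c : List Int) (v : List String) (o : List String) (parts : List String),
    (ssrParts c v l o parts).map (fun ps => PySem.Str.join " " ps.reverse) =
      (sequenceSymbolRetrieverCore c v l o).map
        (fun r => PySem.Str.join " " ((parts ++ [r]).reverse)) := by
  induction n with
  | zero =>
    intro l hl c v o parts
    have : l = [] := List.eq_nil_of_length_eq_zero (Nat.le_zero.mp hl)
    subst this
    rw [ssrParts.eq_def, sequenceSymbolRetrieverCore.eq_def]
    cases PySem.List.pop? o with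
    | none => simp
    | some p => simp [ssrOperand, PySem.List.pop?, PySem.List.pyIdx?]
  | succ n ih =>
    intro l hl c v o parts
    rw [ssrParts.eq_def, sequenceSymbolRetrieverCore.eq_def]
    cases ho : PySem.List.pop? o with
    | none => simp
    | some po =>
      obtain ⟨opSymbol, o'⟩ := po
      simp only
      cases hl1 : PySem.List.pop? l with
      | none =>
        have hop : ssrOperand c v l = none := by simp [ssrOperand, hl1]
        rw [hop]; simp
      | some pl =>
        obtain ⟨loadType, l1⟩ := pl
        have hlen : l1.length + 1 = l.length := by
          have := PySem.List.length_of_pop?_eq_some _ hl1; simpa using this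
        have step2 : ∀ (rhs : String) (c1 : List Int) (v1 : List String),
            ((match PySem.List.pyGet? l1 (-1) with
              | none => none
              | some peek =>
                if peek = "BINARY_OP" then
                  match h2 : PySem.List.pop? l1 with
                  | none => none
                  | some (_, l2) => ssrParts c1 v1 l2 o' (parts ++ [opSymbol ++ " " ++ rhs])
                else
                  (ssrOperand c1 v1 l1).map
                    (fun q : String × List Int × List String × List String =>
                      parts ++ [opSymbol ++ " " ++ rhs] ++ [q.1])).map
              (fun ps : List String => PySem.Str.join " " ps.reverse)) =
            ((match h2 : PySem.List.pop? l1 with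
              | none => none
              | some (loadType2, l2) =>
                if loadType2 = "LOAD_FAST" then
                  (PySem.List.pop? v1).map (fun p : String × List String =>
                    "symbolRetriever[\"" ++ p.1 ++ "\"] " ++ (opSymbol ++ " " ++ rhs))
                else if loadType2 = "LOAD_CONST" then
                  (PySem.List.pop? c1).map (fun p : Int × List Int =>
                    PySem.Int.toStr p.1 ++ " " ++ (opSymbol ++ " " ++ rhs))
                else if loadType2 = "BINARY_OP" then
                  (sequenceSymbolRetrieverCore c1 v1 l2 o').map
                    (fun r : String => r ++ " " ++ (opSymbol ++ " " ++ rhs))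
                else none).map
              (fun r : String => PySem.Str.join " " ((parts ++ [r]).reverse))) := by
          intro rhs c1 v1
          rcases List.eq_nil_or_concat l1 with hnil | ⟨l1', last, hcat⟩
          · subst hnil
            simp [PySem.List.pyGet?, PySem.List.pyIdx?, PySem.List.pop?]
          · rw [hcat, List.concat_eq_append]
            rw [PySem.List.pyGet?_neg_one_append_singleton, PySem.List.pop?_last]
            simp only
            by_cases hbo : last = "BINARY_OP"
            · subst hbo
              have hn : l1'.length ≤ n := by
                rw [hcat] at hlen; simp at hlen; omega
              rw [if_pos rfl, if_neg (by decide), if_neg (by decide), if_pos rfl]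
              rw [ih l1' hn]
              cases sequenceSymbolRetrieverCore c1 v1 l1' o' with
              | none => simp
              | some r =>
                simp only [Option.map_some, Option.map_map, Function.comp_def]
                exact congrArg some (J_step parts (opSymbol ++ " " ++ rhs) r)
            · rw [if_neg hbo]
              rw [ssrOperand, PySem.List.pop?_last]
              simp only
              by_cases hf : last = "LOAD_FAST"
              · rw [if_pos hf, if_pos hf]
                cases PySem.List.pop? v1 with
                | none => simp
                | some p =>
                  simp only [Option.map_map, Option.map_some, Function.comp]
                  rw [split_lhs_fast, J_step]
              · rw [if_neg hf, if_neg hf]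
                by_cases hc : last = "LOAD_CONST"
                · rw [if_pos hc, if_pos hc]
                  cases PySem.List.pop? c1 with
                  | none => simp
                  | some p =>
                    simp only [Option.map_map, Option.map_some, Function.comp]
                    rw [J_step]
                · simp [hc, hbo]
        by_cases hf : loadType = "LOAD_FAST"
        · simp only [hf, if_pos]
          cases hv : PySem.List.pop? v with
          | none =>
            have hop : ssrOperand c v l = none := by simp [ssrOperand, hl1, hf, hv]
            rw [hop]; simp [hf]
          | some pv =>
            have hop : ssrOperand c v l =
                some ("symbolRetriever[\"" ++ pv.1 ++ "\"]", c, pv.2, l1) := by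
              simp [ssrOperand, hl1, hf, hv]
            rw [hop]
            simp only [Option.map_some]
            rw [split_fast]
            exact step2 _ _ _
        · by_cases hc : loadType = "LOAD_CONST"
          · simp only [hc, hf, if_neg, if_pos, reduceCtorEq]
            cases hcv : PySem.List.pop? c with
            | none =>
              have hop : ssrOperand c v l = none := by simp [ssrOperand, hl1, hf, hc, hcv]
              rw [hop]; simp [hf, hc]
            | some pc =>
              have hop : ssrOperand c v l = some (PySem.Int.toStr pc.1, pc.2, v, l1) := by
                simp [ssrOperand, hl1, hf, hc, hcv]
              rw [hop]
              simp only [Option.map_some]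
              exact step2 _ _ _
          · have hop : ssrOperand c v l = none := by simp [ssrOperand, hl1, hf, hc]
            rw [hop]; simp [hf, hc]

theorem sequenceSymbolRetriever_spec : Claim_equal_sequenceSymbolRetriever := by
  intro c v l o _ _
  unfold Spec_sequenceSymbolRetriever sequenceSymbolRetriever sequenceSymbolRetriever_alt
  rw [parts_eq_core l.length l (le_refl _)]
  cases sequenceSymbolRetrieverCore c v l o with
  | none => rfl
  | some r => simp [join_single]
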